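-- pv_equiv track=rewrite | github.com/takahiro-shimizu-2/judgesystem | packages/engine/domain/ocr_processing.py | _select_best_value
-- ===== SOURCE A (Python) =====
-- from collections import Counter
--
-- def _select_best_value(values):
--     """
--     複数の値から "もっともらしい" 値を選択
--     """
--     valid_values = [
--         v for v in values
--         if v is not None
--         and v != ''
--         and str(v).lower() not in ['null', 'nan', 'none']
--     ]
--
--     if not valid_values:
--         return None
--
--     counter = Counter(valid_values)
--     most_common = counter.most_common(1)[0][0]
--
--     return most_common
-- ===== SOURCE B (Python) =====
-- def _select_best_value(values):
--     """
--     One fused pass: count valid values in a plain dict while tracking the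
--     current best (Counter tie-break = first-seen among max counts, kept via
--     first-occurrence ranks), instead of Counter + most_common.
--     """
--     counts = {}
--     first = {}
--     best = None
--     best_count = 0
--     best_first = -1
--     for v in values:
--         if v is None or v == '' or str(v).lower() in ('null', 'nan', 'none'):
--             continue
--         if v not in first:
--             first[v] = len(first)
--         c = counts.get(v, 0) + 1
--         counts[v] = c
--         if c > best_count or (c == best_count and first[v] < best_first):
--             best = v
--             best_count = c
--             best_first = first[v]
--     return best
-- ===== Notes on version B (the rewrite author's own statement) =====
-- stated objective: alternative
-- what changed: Replaces filter-list + Counter + most_common(1) with one fused pass that counts in a plain dict and maintains the running best value inline (update on strictly greater count, or equal count with an earlier first-occurrence rank), so the rank/sort step of most_common disappears.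
import Mathlib
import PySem

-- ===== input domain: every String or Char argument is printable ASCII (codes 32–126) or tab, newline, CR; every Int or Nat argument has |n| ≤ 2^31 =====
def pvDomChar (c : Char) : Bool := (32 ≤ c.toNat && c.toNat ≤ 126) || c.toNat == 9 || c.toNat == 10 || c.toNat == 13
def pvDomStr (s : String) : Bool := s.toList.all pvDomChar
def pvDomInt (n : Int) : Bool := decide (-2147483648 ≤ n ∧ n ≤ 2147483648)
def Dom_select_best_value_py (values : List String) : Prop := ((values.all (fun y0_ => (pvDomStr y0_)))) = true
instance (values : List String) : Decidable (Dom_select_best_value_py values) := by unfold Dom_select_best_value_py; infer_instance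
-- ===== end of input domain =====

-- B replaces filter + Counter + most_common by ONE fused counting pass that keeps the running best
-- (strict-greater count, or equal count with earlier first occurrence); objective: alternative.

-- ===== PORT A =====
-- the validity test both Pythons share: v != '' and str(v).lower() not in ['null','nan','none']
-- ('v is None' can never fire: the arguments are strings)
def pvValid (v : String) : Bool :=
  !(v == "") && !(["null", "nan", "none"].contains (PySem.Str.lower v))

def select_best_value_py (values : List String) : Option String :=
  let valid_values := values.filter (fun v => pvValid v)
  if valid_values = [] then none
  else
    -- counter.most_common(1)[0][0]: most_common(1) = stable descending sort of items by count, first item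
    match PySem.List.sorted (PySem.Dict.counter valid_values).items (fun p => p.2) true with
    | [] => none   -- unreachable: valid_values ≠ [] (Python would raise IndexError)
    | p :: _ => some p.1

-- ===== PORT B =====
-- loop body of Source B: state = (counts, first, best, best_count, best_first)
def pvBStep (st : PySem.Dict String Int × PySem.Dict String Int × Option String × Int × Int)
    (v : String) : PySem.Dict String Int × PySem.Dict String Int × Option String × Int × Int :=
  match st with
  | (counts, first, best, best_count, best_first) =>
    if !(pvValid v) then (counts, first, best, best_count, best_first)  -- continue
    else
      let first' := if first.contains v then first else first.insert v (first.size : Int)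
      let c := counts.getD v 0 + 1
      let counts' := counts.insert v c
      if c > best_count ∨ (c = best_count ∧ first'.getD v 0 < best_first) then
        (counts', first', some v, c, first'.getD v 0)
      else
        (counts', first', best, best_count, best_first)

def select_best_value_py_alt (values : List String) : Option String :=
  (values.foldl pvBStep (PySem.Dict.empty, PySem.Dict.empty, none, 0, -1)).2.2.1

-- ===== PRECONDITION & SPEC =====
def Spec_select_best_value_py (values : List String) (out : Option String) : Prop := out = select_best_value_py_alt values
instance (values : List String) (out : Option String) : Decidable (Spec_select_best_value_py values out) := by unfold Spec_select_best_value_py; infer_instance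

-- ===== CLAIM (what is proved, stated in full; the proofs are below) =====
def Claim_equal_select_best_value_py : Prop := ∀ (values : List String), Dom_select_best_value_py values → Spec_select_best_value_py values (select_best_value_py values)

-- ===== LEMMAS AND PROOFS =====

-- "argmax, first on ties": the one-option fold both sides reduce to
def pvStep {α : Type} (key : α → Int) (b : Option α) (x : α) : Option α :=
  match b with
  | none => some x
  | some m => if key m < key x then some x else some m

def pvAF {α : Type} (key : α → Int) (l : List α) : Option α := l.foldl (pvStep key) none

theorem pvHead?_insertBy {α : Type} (before : α → α → Bool) (x : α) (ys : List α) :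
    (PySem.List.insertBy before x ys).head? =
      some (match ys with | [] => x | y :: _ => if before x y then x else y) := by
  cases ys with
  | nil => simp [PySem.List.insertBy]
  | cons y t => simp only [PySem.List.insertBy]; split <;> simp

theorem pvHead?_foldl_ins {α : Type} (key : α → Int) (l : List α) (acc : List α) :
    (l.foldl (fun acc x => PySem.List.insertBy (fun a b => decide (key b < key a)) x acc) acc).head?
      = l.foldl (pvStep key) acc.head? := by
  induction l generalizing acc with
  | nil => rfl
  | cons x t ih =>
    simp only [List.foldl_cons]
    rw [ih]
    congr 1
    rw [pvHead?_insertBy]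
    cases acc with
    | nil => rfl
    | cons y ys => simp only [pvStep, List.head?]; split <;> simp_all

theorem pvHead?_sorted_rev {α : Type} (key : α → Int) (l : List α) :
    (PySem.List.sorted l key true).head? = pvAF key l := by
  rw [PySem.List.sorted_rev_eq_foldl_insertBy]
  exact pvHead?_foldl_ins key l []

theorem pvAF_map_aux {α β : Type} (f : α → β) (key : β → Int) (l : List α) (b : Option α) :
    (l.map f).foldl (pvStep key) (b.map f) = (l.foldl (pvStep (fun a => key (f a))) b).map f := by
  induction l generalizing b with
  | nil => rfl
  | cons x t ih =>
    simp only [List.map_cons, List.foldl_cons]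
    rw [← ih]
    congr 1
    cases b with
    | none => rfl
    | some m => simp only [pvStep, Option.map_some]; split <;> simp_all

theorem pvAF_map {α β : Type} (f : α → β) (key : β → Int) (l : List α) :
    pvAF key (l.map f) = (pvAF (fun a => key (f a)) l).map f :=
  pvAF_map_aux f key l none

theorem pvAF_congr_aux {α : Type} (k1 k2 : α → Int) (l : List α) (h : ∀ d ∈ l, k1 d = k2 d)
    (b : Option α) (hb : ∀ m, b = some m → k1 m = k2 m) :
    l.foldl (pvStep k1) b = l.foldl (pvStep k2) b := by
  induction l generalizing b with
  | nil => rfl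
  | cons x t ih =>
    have hx : k1 x = k2 x := h x (by simp)
    simp only [List.foldl_cons]
    have hstep : pvStep k1 b x = pvStep k2 b x := by
      cases b with
      | none => rfl
      | some m => simp only [pvStep]; rw [hb m rfl, hx]
    rw [hstep]
    refine ih (fun d hd => h d (by simp [hd])) _ ?_
    intro m hm
    cases b with
    | none => simp only [pvStep] at hm; cases hm; exact hx
    | some b0 =>
      simp only [pvStep] at hm
      split at hm <;> cases hm
      · exact hx
      · exact hb _ rfl

theorem pvAF_congr {α : Type} (k1 k2 : α → Int) (l : List α) (h : ∀ d ∈ l, k1 d = k2 d) :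
    pvAF k1 l = pvAF k2 l :=
  pvAF_congr_aux k1 k2 l h none (by simp)

theorem pvAF_mem_aux' {α : Type} (key : α → Int) (l : List α) (b : Option α) (m : α)
    (h : l.foldl (pvStep key) b = some m) : b = some m ∨ m ∈ l := by
  induction l generalizing b with
  | nil => exact Or.inl h
  | cons x t ih =>
    simp only [List.foldl_cons] at h
    rcases ih _ h with h' | h'
    · cases b with
      | none => simp only [pvStep] at h'; cases h'; simp
      | some b0 =>
        simp only [pvStep] at h'
        split at h' <;> cases h'
        · simp
        · exact Or.inl rfl
    · simp [h']

theorem pvAF_mem {α : Type} (key : α → Int) (l : List α) (m : α) (h : pvAF key l = some m) :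
    m ∈ l := by
  rcases pvAF_mem_aux' key l none m h with h' | h'
  · cases h'
  · exact h'

theorem pvAF_none_aux {α : Type} (key : α → Int) (l : List α) (b : Option α) :
    l.foldl (pvStep key) b = none ↔ b = none ∧ l = [] := by
  induction l generalizing b with
  | nil => simp
  | cons x t ih =>
    simp only [List.foldl_cons, ih]
    constructor
    · rintro ⟨h1, h2⟩
      cases b with
      | none => simp only [pvStep] at h1; cases h1
      | some b0 => simp only [pvStep] at h1; split at h1 <;> cases h1
    · rintro ⟨-, h⟩; cases h

theorem pvAF_none_iff {α : Type} (key : α → Int) (l : List α) :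
    pvAF key l = none ↔ l = [] := by
  unfold pvAF; rw [pvAF_none_aux]; simp

theorem pvAF_max_aux {α : Type} (key : α → Int) (l : List α) (b : Option α) (m : α)
    (h : l.foldl (pvStep key) b = some m) :
    (∀ d ∈ l, key d ≤ key m) ∧ (∀ b0, b = some b0 → key b0 ≤ key m) := by
  induction l generalizing b with
  | nil =>
    cases h
    exact ⟨by simp, fun b0 hb => le_of_eq (congrArg key (Option.some.inj hb)).symm⟩
  | cons x t ih =>
    simp only [List.foldl_cons] at h
    obtain ⟨h1, h2⟩ := ih _ h
    have hx : key x ≤ key m := by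
      cases b with
      | none => exact h2 x rfl
      | some b0 =>
        simp only [pvStep] at h2
        split at h2
        · exact h2 x rfl
        · have := h2 b0 rfl; omega
    refine ⟨?_, ?_⟩
    · intro d hd
      rcases List.mem_cons.mp hd with rfl | hd
      · exact hx
      · exact h1 d hd
    · rintro b0 rfl
      simp only [pvStep] at h2
      split at h2
      · have := h2 x rfl; omega
      · exact h2 b0 rfl

theorem pvAF_max {α : Type} (key : α → Int) (l : List α) (m : α) (h : pvAF key l = some m) :
    ∀ d ∈ l, key d ≤ key m :=
  (pvAF_max_aux key l none m h).1

theorem pvAF_append_singleton {α : Type} (key : α → Int) (l : List α) (x : α) :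
    pvAF key (l ++ [x]) = pvStep key (pvAF key l) x := by
  simp [pvAF, List.foldl_append]

-- bumping one element's key by 1 moves the argmax exactly as B's update rule does
theorem pvAF_bump {α : Type} [BEq α] [LawfulBEq α] (key key' : α → Int) (l : List α) (x : α)
    (hx : x ∈ l) (hnd : l.Nodup) (hk : key' x = key x + 1)
    (ho : ∀ d ∈ l, d ≠ x → key' d = key d) (m : α) (hm : pvAF key l = some m) :
    pvAF key' l = if key m < key' x then some x
      else if key' x = key m ∧ l.idxOf x < l.idxOf m then some x else some m := by
  induction l using List.reverseRecOn generalizing m with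
  | nil => cases hx
  | append_singleton t y ih =>
    have hndt : t.Nodup := (List.nodup_append.mp hnd).1
    have hyt : y ∉ t := fun hmem => (List.nodup_append.mp hnd).2.2 y hmem y (by simp) rfl
    rw [pvAF_append_singleton] at hm ⊢
    by_cases hxy : x = y
    · -- x is the appended element, x ∉ t
      subst hxy
      have hxt : x ∉ t := hyt
      have hcongr : pvAF key' t = pvAF key t :=
        pvAF_congr _ _ t (fun d hd => ho d (by simp [hd]) (fun h => hxt (h ▸ hd)))
      rw [hcongr]
      cases hbt : pvAF key t with
      | none =>
        rw [hbt] at hm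
        simp only [pvStep] at hm
        cases hm
        simp only [pvStep]
        rw [if_pos (by omega)]
      | some b =>
        rw [hbt] at hm
        have hbmem := pvAF_mem _ _ _ hbt
        have hbx : b ≠ x := fun h => hxt (h ▸ hbmem)
        have hkb : key' b = key b := ho b (by simp [hbmem]) hbx
        have idx1 : (t ++ [x]).idxOf x = t.length := by
          rw [List.idxOf_append, if_neg hxt]; simp
        have idx2 : (t ++ [x]).idxOf b = t.idxOf b := List.idxOf_append_of_mem hbmem
        have idx3 : t.idxOf b < t.length := List.idxOf_lt_length_of_mem hbmem
        simp only [pvStep] at hm ⊢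
        rw [hkb, hk]
        split_ifs at hm with h1 <;> cases hm <;> simp only [idx1, idx2] <;>
          split_ifs <;> first | rfl | omega
    · -- x ∈ t, y appended
      have hxt : x ∈ t := by
        rcases List.mem_append.mp hx with h | h
        · exact h
        · exact absurd (List.mem_singleton.mp h) hxy
      have hky : key' y = key y := ho y (by simp) (fun h => hxy h.symm)
      have hot : ∀ d ∈ t, d ≠ x → key' d = key d := fun d hd => ho d (by simp [hd])
      cases hbt : pvAF key t with
      | none =>
        exact absurd ((pvAF_none_iff key t).mp hbt ▸ hxt) (List.not_mem_nil)
      | some mt =>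
        have ihm := ih hxt hndt hot mt hbt
        have hmtmem := pvAF_mem _ _ _ hbt
        have hXK : key x ≤ key mt := pvAF_max _ _ _ hbt x hxt
        have idxx : (t ++ [y]).idxOf x = t.idxOf x := List.idxOf_append_of_mem hxt
        have idxmt : (t ++ [y]).idxOf mt = t.idxOf mt := List.idxOf_append_of_mem hmtmem
        have idxy : (t ++ [y]).idxOf y = t.length := by
          rw [List.idxOf_append, if_neg hyt]; simp
        have idxx' : t.idxOf x < t.length := List.idxOf_lt_length_of_mem hxt
        have idxmt' : t.idxOf mt < t.length := List.idxOf_lt_length_of_mem hmtmem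
        rw [hbt] at hm
        simp only [pvStep] at hm
        rw [ihm]
        by_cases hmtx : mt = x
        · subst hmtx
          rw [if_pos (by omega)]
          simp only [pvStep, hky, hk]
          split_ifs at hm with h1 <;> cases hm <;> simp only [idxx, idxy] <;>
            split_ifs <;> first | rfl | omega
        · have hkmt : key' mt = key mt := hot mt hmtmem hmtx
          split_ifs at hm with h1 <;> cases hm <;>
            split_ifs with h2 h3 <;>
            simp only [pvStep, hky, hk, hkmt] <;>
            split_ifs <;> first | rfl | omega

-- the fused pass: abbreviations
def pvCnt (l : List String) (k : String) : Int := ((l.filter (fun v => pvValid v)).count k : Int)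
def pvD (l : List String) : List String := PySem.Set.ofList (l.filter (fun v => pvValid v))

theorem pvB_inv (l : List String) :
    (∀ v, (l.foldl pvBStep (PySem.Dict.empty, PySem.Dict.empty, none, 0, -1)).1.getD v 0 = pvCnt l v) ∧
    (∀ v, (l.foldl pvBStep (PySem.Dict.empty, PySem.Dict.empty, none, 0, -1)).2.1.get? v
        = if v ∈ pvD l then some ((pvD l).idxOf v : Int) else none) ∧
    (l.foldl pvBStep (PySem.Dict.empty, PySem.Dict.empty, none, 0, -1)).2.1.size = (pvD l).length ∧
    (l.foldl pvBStep (PySem.Dict.empty, PySem.Dict.empty, none, 0, -1)).2.2.1 = pvAF (pvCnt l) (pvD l) ∧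
    (∀ m, (l.foldl pvBStep (PySem.Dict.empty, PySem.Dict.empty, none, 0, -1)).2.2.1 = some m →
      (l.foldl pvBStep (PySem.Dict.empty, PySem.Dict.empty, none, 0, -1)).2.2.2.1 = pvCnt l m ∧
      (l.foldl pvBStep (PySem.Dict.empty, PySem.Dict.empty, none, 0, -1)).2.2.2.2 = ((pvD l).idxOf m : Int)) ∧
    ((l.foldl pvBStep (PySem.Dict.empty, PySem.Dict.empty, none, 0, -1)).2.2.1 = none →
      (l.foldl pvBStep (PySem.Dict.empty, PySem.Dict.empty, none, 0, -1)).2.2.2.1 = 0 ∧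
      (l.foldl pvBStep (PySem.Dict.empty, PySem.Dict.empty, none, 0, -1)).2.2.2.2 = -1) := by
  induction l using List.reverseRecOn with
  | nil =>
    refine ⟨fun v => ?_, fun v => ?_, rfl, rfl, ?_, fun _ => ⟨rfl, rfl⟩⟩
    · simp [PySem.Dict.getD_empty, pvCnt]
    · simp [PySem.Dict.get?_empty, pvD]
    · intro m hm; cases hm
  | append_singleton t x ih =>
    obtain ⟨ih1, ih2, ih3, ih4, ih5, ih6⟩ := ih
    simp only [List.foldl_append, List.foldl_cons, List.foldl_nil] at *
    rcases hS : List.foldl pvBStep (PySem.Dict.empty, PySem.Dict.empty, none, 0, -1) t with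
      ⟨counts, first, best, bc, bf⟩
    rw [hS] at ih1 ih2 ih3 ih4 ih5 ih6
    replace ih1 : ∀ v, counts.getD v 0 = pvCnt t v := ih1
    replace ih2 : ∀ v, first.get? v
        = if v ∈ pvD t then some (((pvD t).idxOf v : Nat) : Int) else none := ih2
    replace ih3 : first.size = (pvD t).length := ih3
    replace ih4 : best = pvAF (pvCnt t) (pvD t) := ih4
    replace ih5 : ∀ m, best = some m → bc = pvCnt t m ∧ bf = (((pvD t).idxOf m : Nat) : Int) := ih5
    replace ih6 : best = none → bc = 0 ∧ bf = -1 := ih6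
    cases phv : pvValid x with
    | false =>
      have hfil : (t ++ [x]).filter (fun v => pvValid v) = t.filter (fun v => pvValid v) := by
        simp [List.filter_append, phv]
      have hcnt : pvCnt (t ++ [x]) = pvCnt t := by funext v; simp [pvCnt, hfil]
      have hDeq : pvD (t ++ [x]) = pvD t := by simp [pvD, hfil]
      simp only [pvBStep, phv, Bool.not_false, if_true, hcnt, hDeq]
      exact ⟨ih1, ih2, ih3, ih4, ih5, ih6⟩
    | true =>
      have hfil : (t ++ [x]).filter (fun v => pvValid v)
          = t.filter (fun v => pvValid v) ++ [x] := by
        simp [List.filter_append, phv]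
      have hndD : (pvD t).Nodup := PySem.Set.nodup_ofList _
      have hcnt : ∀ v, pvCnt (t ++ [x]) v = if v = x then pvCnt t v + 1 else pvCnt t v := by
        intro v
        simp only [pvCnt, hfil, List.count_append]
        split_ifs with h
        · subst h; simp
        · simp [List.count_singleton, Ne.symm h]
      have hcx : pvCnt (t ++ [x]) x = pvCnt t x + 1 := by rw [hcnt x, if_pos rfl]
      have hDeq : pvD (t ++ [x]) = if x ∈ pvD t then pvD t else pvD t ++ [x] := by
        simp only [pvD, hfil, PySem.Set.ofList, List.foldl_append, List.foldl_cons,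
          List.foldl_nil]
        show PySem.Set.add _ x = _
        rw [PySem.Set.add]
        have : (List.foldl PySem.Set.add PySem.Set.empty
            (t.filter (fun v => pvValid v))).contains x = decide (x ∈ pvD t) := by
          simp [PySem.Set.contains, pvD, PySem.Set.ofList]
        rw [this]
        by_cases h : x ∈ pvD t <;> simp [pvD, PySem.Set.ofList]
      have hfirstc : first.contains x = decide (x ∈ pvD t) := by
        rw [PySem.Dict.contains_eq_isSome_get?, ih2 x]
        by_cases h : x ∈ pvD t <;> simp [h]
      have hc : counts.getD x 0 + 1 = pvCnt (t ++ [x]) x := by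
        rw [ih1 x, hcx]
      have hcntpos : (0 : Int) ≤ pvCnt t x := by
        unfold pvCnt; exact Int.natCast_nonneg _
      by_cases hmem : x ∈ pvD t
      · -- x already seen: dedup list unchanged, x's count bumped by one
        rw [if_pos hmem] at hDeq
        have hgd : first.getD x 0 = (((pvD t).idxOf x : Nat) : Int) := by
          rw [PySem.Dict.getD_eq_get?_getD, ih2 x, if_pos hmem]; rfl
        cases hbest : best with
        | none =>
          rw [ih4] at hbest
          rw [(pvAF_none_iff _ _).mp hbest] at hmem
          cases hmem
        | some mb =>
          have hbestAF : pvAF (pvCnt t) (pvD t) = some mb := (hbest ▸ ih4).symm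
          have hmbmem := pvAF_mem _ _ _ hbestAF
          have ihb := pvAF_bump (pvCnt t) (pvCnt (t ++ [x])) (pvD t) x hmem hndD
            hcx (fun d _ hd => by rw [hcnt d, if_neg hd]) mb hbestAF
          obtain ⟨hbc, hbf⟩ := ih5 mb hbest
          have hidxx' : (pvD t).idxOf x < (pvD t).length := List.idxOf_lt_length_of_mem hmem
          simp only [pvBStep, phv, Bool.not_true, Bool.false_eq_true, if_false, hfirstc,
            hmem, decide_true, if_true, hDeq]
          have hcnts : ∀ v, (counts.insert x (counts.getD x 0 + 1)).getD v 0
              = pvCnt (t ++ [x]) v := by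
            intro v
            rw [PySem.Dict.getD_insert, hcnt v, ih1 v]
            split_ifs with h
            · rw [h, ih1 x]
            · rfl
          split_ifs with hcond
          · refine ⟨hcnts, ih2, ih3, ?_, fun m hm => ?_, fun h => by cases h⟩
            · rw [ihb]
              split_ifs with g1 g2
              · rfl
              · rfl
              · exfalso; omega
            · cases hm
              exact ⟨hc, hgd⟩
          · have hmbx : mb ≠ x := by
              intro he
              subst he
              exact hcond (Or.inl (by omega))
            refine ⟨hcnts, ih2, ih3, ?_, fun m hm => ?_, fun h => by cases h⟩
            · rw [ihb]
              split_ifs with g1 g2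
              · exfalso; omega
              · exfalso; omega
              · rfl
            · cases hm
              refine ⟨?_, hbf⟩
              rw [hbc, hcnt mb, if_neg hmbx]
      · -- x unseen so far: appended to the dedup list, count becomes 1
        rw [if_neg hmem] at hDeq
        have hcongrD : pvAF (pvCnt (t ++ [x])) (pvD t) = pvAF (pvCnt t) (pvD t) :=
          pvAF_congr _ _ _ (fun d hd => by
            have hdx : d ≠ x := fun h => hmem (h ▸ hd)
            rw [hcnt d, if_neg hdx])
        have hAF' : pvAF (pvCnt (t ++ [x])) (pvD (t ++ [x]))
            = pvStep (pvCnt (t ++ [x])) (pvAF (pvCnt t) (pvD t)) x := by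
          rw [hDeq, pvAF_append_singleton, hcongrD]
        have hidxx : (pvD t ++ [x]).idxOf x = (pvD t).length := by
          rw [List.idxOf_append, if_neg hmem]; simp
        have hidxmem : ∀ v ∈ pvD t, (pvD t ++ [x]).idxOf v = (pvD t).idxOf v :=
          fun v hv => List.idxOf_append_of_mem hv
        have hcf : first.contains x = false := by rw [hfirstc]; simp [hmem]
        simp only [pvBStep, phv, Bool.not_true, Bool.false_eq_true, if_false, hfirstc,
          hmem, decide_false]
        have hgd' : (first.insert x (first.size : Int)).getD x 0
            = (((pvD t).length : Nat) : Int) := by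
          rw [PySem.Dict.getD_eq_get?_getD, PySem.Dict.get?_insert, if_pos rfl, ih3]; rfl
        have hfirst' : ∀ v, (first.insert x (first.size : Int)).get? v
            = if v ∈ pvD (t ++ [x]) then some (((pvD (t ++ [x])).idxOf v : Nat) : Int)
              else none := by
          intro v
          rw [PySem.Dict.get?_insert, hDeq]
          split_ifs with h h2 h2
          · subst h; rw [hidxx, ih3]
          · exact absurd (List.mem_append.mpr (Or.inr (by simp [h]))) h2
          · have hv : v ∈ pvD t := by
              rcases List.mem_append.mp h2 with h3 | h3
              · exact h3
              · exact absurd (List.mem_singleton.mp h3) h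
            rw [ih2 v, if_pos hv, hidxmem v hv]
          · rw [ih2 v, if_neg (fun h3 => h2 (List.mem_append.mpr (Or.inl h3)))]
        have hsz' : (first.insert x (first.size : Int)).size = (pvD (t ++ [x])).length := by
          rw [PySem.Dict.size_insert, hcf, hDeq]
          simp [ih3]
        have hcnts : ∀ v, (counts.insert x (counts.getD x 0 + 1)).getD v 0
            = pvCnt (t ++ [x]) v := by
          intro v
          rw [PySem.Dict.getD_insert, hcnt v, ih1 v]
          split_ifs with h
          · rw [h, ih1 x]
          · rfl
        cases hbest : best with
        | none =>
          have hbestAF : pvAF (pvCnt t) (pvD t) = none := (hbest ▸ ih4).symm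
          obtain ⟨hbc0, hbf0⟩ := ih6 hbest
          split_ifs with hcond
          · refine ⟨hcnts, hfirst', hsz', ?_, fun m hm => ?_, fun h => by cases h⟩
            · rw [hAF', hbestAF]
              rfl
            · cases hm
              refine ⟨hc, ?_⟩
              rw [hgd', hDeq, hidxx]
          · exact absurd (Or.inl (by omega)) hcond
        | some mb =>
          have hbestAF : pvAF (pvCnt t) (pvD t) = some mb := (hbest ▸ ih4).symm
          have hmbmem := pvAF_mem _ _ _ hbestAF
          obtain ⟨hbc, hbf⟩ := ih5 mb hbest
          have hmbx : mb ≠ x := fun he => hmem (he ▸ hmbmem)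
          have hcntmb : pvCnt (t ++ [x]) mb = pvCnt t mb := by
            rw [hcnt mb, if_neg hmbx]
          have hidxmb : (pvD t).idxOf mb < (pvD t).length :=
            List.idxOf_lt_length_of_mem hmbmem
          split_ifs with hcond
          · refine ⟨hcnts, hfirst', hsz', ?_, fun m hm => ?_, fun h => by cases h⟩
            · rw [hAF', hbestAF]
              simp only [pvStep]
              rw [if_pos (by omega)]
            · cases hm
              refine ⟨hc, ?_⟩
              rw [hgd', hDeq, hidxx]
          · refine ⟨hcnts, hfirst', hsz', ?_, fun m hm => ?_, fun h => by cases h⟩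
            · rw [hAF', hbestAF]
              simp only [pvStep]
              rw [if_neg (by omega)]
            · cases hm
              refine ⟨by rw [hbc, hcntmb], ?_⟩
              rw [hbf, hDeq, hidxmem mb hmbmem]

theorem pvB_eq (values : List String) :
    select_best_value_py_alt values = pvAF (pvCnt values) (pvD values) :=
  (pvB_inv values).2.2.2.1

theorem pvA_eq (values : List String) :
    select_best_value_py values = pvAF (pvCnt values) (pvD values) := by
  unfold select_best_value_py
  by_cases hnil : values.filter (fun v => pvValid v) = []
  · rw [if_pos hnil]
    unfold pvD
    rw [hnil]
    rfl
  · rw [if_neg hnil]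
    have hmatch : ∀ (L : List (String × Int)),
        (match L with | [] => (none : Option String) | p :: _ => some p.1)
          = L.head?.map (fun p => p.1) := by
      intro L; cases L <;> rfl
    rw [hmatch, pvHead?_sorted_rev, PySem.Dict.items_counter, pvAF_map, Option.map_map]
    have hid : ((fun p : String × Int => p.1) ∘
        fun k => (k, (List.count k (values.filter fun v => pvValid v) : Int))) = id := rfl
    rw [hid, Option.map_id]
    rfl

-- ===== VERDICT (by name: the statement is the Claim_ definition above) =====
theorem select_best_value_py_spec : Claim_equal_select_best_value_py := by
  intro values _
  unfold Spec_select_best_value_py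
  rw [pvA_eq, pvB_eq]
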